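-- pv_equiv track=rewrite | github.com/baziing/NDA-DataAssist | backend/tools/format/format_analyzer.py | _convert_positions_to_range
-- ===== SOURCE A (Python) =====
-- def _convert_positions_to_range(positions):
--     """将单元格位置集合转换为范围字符串"""
--     if not positions:
--         return ''
--
--     rows = [pos[0] for pos in positions]
--     cols = [pos[1] for pos in positions]
--     min_row, max_row = min(rows), max(rows)
--     min_col, max_col = min(cols), max(cols)
--
--     return f"{min_row}-{max_row},{min_col}-{max_col}"
-- ===== SOURCE B (Python) =====
-- def _convert_positions_to_range(positions):
--     """将单元格位置集合转换为范围字符串"""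
--     it = iter(positions)
--     try:
--         first = next(it)
--     except StopIteration:
--         return ''
--     min_row = max_row = first[0]
--     min_col = max_col = first[1]
--     for pos in it:
--         r, c = pos[0], pos[1]
--         if r < min_row:
--             min_row = r
--         if r > max_row:
--             max_row = r
--         if c < min_col:
--             min_col = c
--         if c > max_col:
--             max_col = c
--     return f"{min_row}-{max_row},{min_col}-{max_col}"
-- ===== Notes on version B (the rewrite author's own statement) =====
-- stated objective: simpler
-- what changed: Single pass over positions maintaining four running extremes, instead of building two intermediate lists and scanning them four times with min/max.
import Mathlib
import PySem

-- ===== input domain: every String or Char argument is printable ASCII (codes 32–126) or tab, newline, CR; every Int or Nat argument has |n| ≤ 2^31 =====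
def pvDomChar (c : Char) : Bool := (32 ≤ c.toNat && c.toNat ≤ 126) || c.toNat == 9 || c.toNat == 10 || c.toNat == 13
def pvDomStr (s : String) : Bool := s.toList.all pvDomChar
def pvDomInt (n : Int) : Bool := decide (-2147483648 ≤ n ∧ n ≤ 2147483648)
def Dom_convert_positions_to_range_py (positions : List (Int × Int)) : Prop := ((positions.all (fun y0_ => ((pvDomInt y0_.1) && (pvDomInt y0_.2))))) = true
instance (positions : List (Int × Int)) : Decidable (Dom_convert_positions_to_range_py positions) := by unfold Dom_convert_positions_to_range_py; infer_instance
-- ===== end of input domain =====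

-- ===== PORT A =====
-- Header: B replaces A's two comprehensions plus four min/max passes by one pass with four running extremes (simpler; return values proved equal).
def convert_positions_to_range_py (positions : List (Int × Int)) : String :=
  if positions = [] then ""
  else
    let rows := positions.map (fun pos => pos.1)
    let cols := positions.map (fun pos => pos.2)
    let min_row := (PySem.List.min? rows (fun x => x)).getD 0   -- nonempty here, so getD's default is never used
    let max_row := (PySem.List.max? rows (fun x => x)).getD 0
    let min_col := (PySem.List.min? cols (fun x => x)).getD 0
    let max_col := (PySem.List.max? cols (fun x => x)).getD 0
    PySem.Int.toStr min_row ++ "-" ++ PySem.Int.toStr max_row ++ "," ++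
      PySem.Int.toStr min_col ++ "-" ++ PySem.Int.toStr max_col

-- ===== PORT B =====
def convert_positions_to_range_py_alt (positions : List (Int × Int)) : String :=
  match positions with
  | [] => ""
  | first :: it =>
    let st := it.foldl (fun (st : Int × Int × Int × Int) pos =>
      let r := pos.1
      let c := pos.2
      ((if r < st.1 then r else st.1),
       (if r > st.2.1 then r else st.2.1),
       (if c < st.2.2.1 then c else st.2.2.1),
       (if c > st.2.2.2 then c else st.2.2.2))) (first.1, first.1, first.2, first.2)
    PySem.Int.toStr st.1 ++ "-" ++ PySem.Int.toStr st.2.1 ++ "," ++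
      PySem.Int.toStr st.2.2.1 ++ "-" ++ PySem.Int.toStr st.2.2.2

-- ===== PRECONDITION & SPEC =====
def Spec_convert_positions_to_range_py (positions : List (Int × Int)) (out : String) : Prop := out = convert_positions_to_range_py_alt positions
instance (positions : List (Int × Int)) (out : String) : Decidable (Spec_convert_positions_to_range_py positions out) := by unfold Spec_convert_positions_to_range_py; infer_instance

-- ===== CLAIM (what is proved, stated in full; the proofs are below) =====
def Claim_equal_convert_positions_to_range_py : Prop := ∀ (positions : List (Int × Int)), Dom_convert_positions_to_range_py positions → Spec_convert_positions_to_range_py positions (convert_positions_to_range_py positions)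

-- ===== LEMMAS AND PROOFS =====

theorem pv_fold4 (it : List (Int × Int)) (a b c d : Int) :
    it.foldl (fun (st : Int × Int × Int × Int) pos =>
      ((if pos.1 < st.1 then pos.1 else st.1),
       (if pos.1 > st.2.1 then pos.1 else st.2.1),
       (if pos.2 < st.2.2.1 then pos.2 else st.2.2.1),
       (if pos.2 > st.2.2.2 then pos.2 else st.2.2.2))) (a, b, c, d)
    = ((it.map (fun pos => pos.1)).foldl min a,
       (it.map (fun pos => pos.1)).foldl max b,
       (it.map (fun pos => pos.2)).foldl min c,
       (it.map (fun pos => pos.2)).foldl max d) := by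
  induction it generalizing a b c d with
  | nil => rfl
  | cons p t ih =>
    simp only [List.foldl_cons, List.map_cons, ih]
    congr 1 <;> [skip; congr 1] <;> [skip; skip; congr 1] <;>
      congr 1 <;> simp [min_def, max_def] <;> omega

-- ===== VERDICT (by name: the statement is the Claim_ definition above) =====
theorem convert_positions_to_range_py_spec : Claim_equal_convert_positions_to_range_py := by
  intro positions _
  unfold Spec_convert_positions_to_range_py
  cases positions with
  | nil => rfl
  | cons first it =>
    simp only [convert_positions_to_range_py, convert_positions_to_range_py_alt,
      List.map_cons, PySem.List.min?_id_cons, PySem.List.max?_id_cons,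
      Option.getD_some, pv_fold4, if_neg (List.cons_ne_nil first it)]
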